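-- pv_equiv track=rewrite | github.com/brayandm/Integration | plot.py | delete_nones
-- ===== SOURCE A (Python) =====
-- def delete_nones(list_a, list_b):
--
--     assert(len(list_a) == len(list_b))
--
--     temp_a = []
--     temp_b = []
--
--     list = []
--
--     for i in range(len(list_a)):
--
--         if list_a[i] != None and list_b[i] != None:
--
--             temp_a.append(list_a[i])
--             temp_b.append(list_b[i])
--
--         elif len(temp_a) > 0 or len(temp_b) > 0:
--
--             list.append((temp_a, temp_b))
--             temp_a = []
--             temp_b = []
--
--     if len(temp_a) > 0 or len(temp_b) > 0:
--
--         list.append((temp_a, temp_b))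
--         temp_a = []
--         temp_b = []
--
--     return list
-- ===== SOURCE B (Python) =====
-- from itertools import groupby
--
-- def delete_nones(list_a, list_b):
--
--     assert(len(list_a) == len(list_b))
--
--     result = []
--
--     for key, grp in groupby(zip(list_a, list_b),
--                             key=lambda p: p[0] != None and p[1] != None):
--         if key:
--             pairs = list(grp)
--             result.append(([a for a, _ in pairs], [b for _, b in pairs]))
--
--     return result
-- ===== Notes on version B (the rewrite author's own statement) =====
-- stated objective: idiomatic
-- what changed: Replaces the accumulate-and-flush loop with its end-of-loop flush by grouping consecutive both-non-None runs of zip(list_a,list_b) with itertools.groupby and unzipping each True run.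
import Mathlib
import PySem

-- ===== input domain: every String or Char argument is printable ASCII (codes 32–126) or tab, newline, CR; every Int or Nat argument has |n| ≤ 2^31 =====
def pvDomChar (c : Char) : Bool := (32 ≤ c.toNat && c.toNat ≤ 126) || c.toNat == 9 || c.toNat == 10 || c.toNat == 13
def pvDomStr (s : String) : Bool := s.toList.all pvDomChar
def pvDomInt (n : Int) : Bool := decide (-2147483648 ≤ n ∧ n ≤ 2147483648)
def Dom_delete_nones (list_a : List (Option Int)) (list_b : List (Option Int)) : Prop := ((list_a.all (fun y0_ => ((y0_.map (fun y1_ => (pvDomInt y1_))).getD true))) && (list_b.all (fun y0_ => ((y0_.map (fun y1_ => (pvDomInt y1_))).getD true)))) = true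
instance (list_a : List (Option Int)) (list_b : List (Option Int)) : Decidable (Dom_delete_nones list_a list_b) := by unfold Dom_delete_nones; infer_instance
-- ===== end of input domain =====

-- B groups consecutive both-non-None runs of the zipped lists with an itertools.groupby-style
-- helper instead of A's accumulate-and-flush loop with its end-of-loop flush (idiomatic; return value only).

-- ===== PORT A =====
-- A's 'for i in range(len(list_a))' loop reading list_a[i]/list_b[i] with state (temp_a, temp_b, list),
-- as the obvious simultaneous structural recursion over the two equal-length lists.
def dnLoopA : List (Option Int) → List (Option Int) → List Int → List Int → List (List Int × List Int) → List (List Int × List Int)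
  | a :: as_, b :: bs, temp_a, temp_b, acc =>
    match a, b with
    | some x, some y => dnLoopA as_ bs (temp_a ++ [x]) (temp_b ++ [y]) acc
    | _, _ =>
      if temp_a.length > 0 ∨ temp_b.length > 0 then
        dnLoopA as_ bs [] [] (acc ++ [(temp_a, temp_b)])
      else
        dnLoopA as_ bs temp_a temp_b acc
  | _, _, temp_a, temp_b, acc =>
    if temp_a.length > 0 ∨ temp_b.length > 0 then acc ++ [(temp_a, temp_b)] else acc

def delete_nones (list_a : List (Option Int)) (list_b : List (Option Int)) : List (List Int × List Int) :=
  dnLoopA list_a list_b [] [] []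

-- ===== PORT B =====
-- key(p) = p[0] != None and p[1] != None
def dnKey (p : Option Int × Option Int) : Bool := p.1.isSome && p.2.isSome

-- itertools.groupby over the zipped pairs: consecutive runs with equal key
def dnGroupby : List (Option Int × Option Int) → List (Bool × List (Option Int × Option Int))
  | [] => []
  | p :: ps =>
    let k := dnKey p
    (k, p :: ps.takeWhile (fun q => dnKey q == k)) :: dnGroupby (ps.dropWhile (fun q => dnKey q == k))
  termination_by l => l.length
  decreasing_by
    simp only [List.length_cons]
    have := List.length_dropWhile_le (p := fun q => dnKey q == dnKey p) (l := ps)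
    omega

def delete_nones_alt (list_a : List (Option Int)) (list_b : List (Option Int)) : List (List Int × List Int) :=
  (dnGroupby (list_a.zip list_b)).foldl
    (fun result g =>
      if g.1 then result ++ [(g.2.filterMap (fun q => q.1), g.2.filterMap (fun q => q.2))]
      else result) []

-- ===== PRECONDITION & SPEC =====
-- A raises AssertionError when the two lists have different lengths; Pre_ excludes exactly those.
def Pre_delete_nones (list_a : List (Option Int)) (list_b : List (Option Int)) : Prop :=
  list_a.length = list_b.length
instance (list_a : List (Option Int)) (list_b : List (Option Int)) : Decidable (Pre_delete_nones list_a list_b) := by unfold Pre_delete_nones; infer_instance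

def pvWitness_delete_nones : List (Option Int) × List (Option Int) :=
  ([some 1, none, some 2], [some 3, some 4, none])

def Spec_delete_nones (list_a : List (Option Int)) (list_b : List (Option Int)) (out : List (List Int × List Int)) : Prop := out = delete_nones_alt list_a list_b
instance (list_a : List (Option Int)) (list_b : List (Option Int)) (out : List (List Int × List Int)) : Decidable (Spec_delete_nones list_a list_b out) := by unfold Spec_delete_nones; infer_instance

-- ===== CLAIM (what is proved, stated in full; the proofs are below) =====
def Claim_equal_delete_nones : Prop := ∀ (list_a : List (Option Int)) (list_b : List (Option Int)), Dom_delete_nones list_a list_b → Pre_delete_nones list_a list_b → Spec_delete_nones list_a list_b (delete_nones list_a list_b)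

-- ===== LEMMAS AND PROOFS =====

-- A's loop, rephrased over the zipped list (same state, same branches)
def dnAux : List (Option Int × Option Int) → List Int → List Int → List (List Int × List Int) → List (List Int × List Int)
  | [], temp_a, temp_b, acc =>
    if temp_a.length > 0 ∨ temp_b.length > 0 then acc ++ [(temp_a, temp_b)] else acc
  | (a, b) :: ps, temp_a, temp_b, acc =>
    match a, b with
    | some x, some y => dnAux ps (temp_a ++ [x]) (temp_b ++ [y]) acc
    | _, _ =>
      if temp_a.length > 0 ∨ temp_b.length > 0 then
        dnAux ps [] [] (acc ++ [(temp_a, temp_b)])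
      else
        dnAux ps temp_a temp_b acc

theorem dnLoopA_eq_aux : ∀ (la lb : List (Option Int)) (ta tb : List Int) (acc : List (List Int × List Int)),
    la.length = lb.length → dnLoopA la lb ta tb acc = dnAux (la.zip lb) ta tb acc := by
  intro la
  induction la with
  | nil =>
    intro lb ta tb acc h
    cases lb with
    | nil => simp [dnLoopA, dnAux]
    | cons b bs => simp at h
  | cons a as_ ih =>
    intro lb ta tb acc h
    cases lb with
    | nil => simp at h
    | cons b bs =>
      simp at h
      cases a <;> cases b <;>
        simp only [dnLoopA, dnAux, List.zip_cons_cons] <;>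
        first
          | exact ih bs _ _ _ h
          | (split <;> exact ih bs _ _ _ h)

theorem dnAux_acc : ∀ (zs : List (Option Int × Option Int)) (ta tb : List Int) (acc : List (List Int × List Int)),
    dnAux zs ta tb acc = acc ++ dnAux zs ta tb [] := by
  intro zs
  induction zs with
  | nil => intro ta tb acc; simp [dnAux]; split <;> simp
  | cons p ps ih =>
    intro ta tb acc
    obtain ⟨a, b⟩ := p
    cases a <;> cases b <;> simp only [dnAux]
    · split
      · rw [ih _ _ (acc ++ _), ih _ _ ([] ++ _)]; simp
      · exact ih _ _ _
    · split
      · rw [ih _ _ (acc ++ _), ih _ _ ([] ++ _)]; simp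
      · exact ih _ _ _
    · split
      · rw [ih _ _ (acc ++ _), ih _ _ ([] ++ _)]; simp
      · exact ih _ _ _
    · exact ih _ _ _

-- a run of both-non-None pairs just extends the pending chunks
theorem dnAux_trueRun : ∀ (run rest : List (Option Int × Option Int)) (ta tb : List Int),
    (∀ p ∈ run, dnKey p = true) →
    dnAux (run ++ rest) ta tb [] =
      dnAux rest (ta ++ run.filterMap (fun q => q.1)) (tb ++ run.filterMap (fun q => q.2)) [] := by
  intro run
  induction run with
  | nil => intro rest ta tb _; simp
  | cons p ps ih =>
    intro rest ta tb h
    obtain ⟨a, b⟩ := p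
    have hk := h (a, b) (List.mem_cons_self ..)
    cases a <;> cases b <;> simp [dnKey] at hk
    simp only [List.cons_append, dnAux, List.filterMap_cons]
    rw [ih rest _ _ (fun q hq => h q (List.mem_cons_of_mem _ hq))]
    simp

-- a run of discarded pairs with empty pending chunks is skipped
theorem dnAux_falseRun : ∀ (run rest : List (Option Int × Option Int)),
    (∀ p ∈ run, dnKey p = false) →
    dnAux (run ++ rest) [] [] [] = dnAux rest [] [] [] := by
  intro run
  induction run with
  | nil => intro rest _; simp
  | cons p ps ih =>
    intro rest h
    obtain ⟨a, b⟩ := p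
    have hk := h (a, b) (List.mem_cons_self ..)
    cases a <;> cases b <;> simp [dnKey] at hk <;>
      · simp only [List.cons_append, dnAux, List.length_nil]
        first
          | (rw [if_neg (by simp)]; exact ih rest (fun q hq => h q (List.mem_cons_of_mem _ hq)))

def dnStep (result : List (List Int × List Int)) (g : Bool × List (Option Int × Option Int)) : List (List Int × List Int) :=
  if g.1 then result ++ [(g.2.filterMap (fun q => q.1), g.2.filterMap (fun q => q.2))] else result

theorem dnFold_acc : ∀ (gs : List (Bool × List (Option Int × Option Int))) (acc : List (List Int × List Int)),
    gs.foldl dnStep acc = acc ++ gs.foldl dnStep [] := by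
  intro gs
  induction gs with
  | nil => simp
  | cons g gs ih =>
    intro acc
    simp only [List.foldl_cons]
    rw [ih (dnStep acc g), ih (dnStep [] g)]
    unfold dnStep
    split <;> simp

theorem dnDropWhile_head {α : Type} (p : α → Bool) : ∀ (l : List α) (q : α) (qs : List α),
    l.dropWhile p = q :: qs → p q = false := by
  intro l
  induction l with
  | nil => intro q qs h; simp at h
  | cons a l ih =>
    intro q qs h
    rw [List.dropWhile_cons] at h
    split at h
    · exact ih q qs h
    · rename_i hpa
      obtain ⟨rfl, -⟩ := List.cons.inj h
      simpa using hpa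

theorem dnMain : ∀ (n : ℕ) (zs : List (Option Int × Option Int)), zs.length ≤ n →
    dnAux zs [] [] [] = (dnGroupby zs).foldl dnStep [] := by
  intro n
  induction n with
  | zero =>
    intro zs h
    have : zs = [] := List.eq_nil_of_length_eq_zero (Nat.le_zero.mp h)
    subst this; simp [dnAux, dnGroupby]
  | succ m ih =>
    intro zs h
    cases zs with
    | nil => simp [dnAux, dnGroupby]
    | cons p ps =>
      simp only [List.length_cons] at h
      set k := dnKey p with hk
      set run := ps.takeWhile (fun q => dnKey q == k) with hrun
      set rest := ps.dropWhile (fun q => dnKey q == k) with hrest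
      have hps : run ++ rest = ps := List.takeWhile_append_dropWhile
      have hrestlen : rest.length ≤ m := by
        have := List.length_dropWhile_le (p := fun q => dnKey q == k) (l := ps)
        rw [← hrest] at this; omega
      have hrunall : ∀ q ∈ run, dnKey q = k := by
        intro q hq
        have := List.mem_takeWhile_imp (hrun ▸ hq)
        simpa using this
      rw [dnGroupby]
      simp only [← hk, ← hrun, ← hrest, List.foldl_cons]
      rw [dnFold_acc]
      cases hkk : k with
      | false =>
        have hall : ∀ q ∈ p :: run, dnKey q = false := by
          intro q hq
          rcases List.mem_cons.mp hq with h1 | h1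
          · subst h1; rw [← hk, hkk]
          · rw [hrunall q h1, hkk]
        have := dnAux_falseRun (p :: run) rest hall
        simp only [List.cons_append, hps] at this
        rw [show dnAux (p :: ps) [] [] [] = dnAux ((p :: run) ++ rest) [] [] [] by rw [List.cons_append, hps]]
        rw [dnAux_falseRun _ _ hall, ih rest hrestlen]
        simp [dnStep]
      | true =>
        obtain ⟨a, b⟩ := p
        have hp : dnKey (a, b) = true := by rw [← hk, hkk]
        cases a <;> cases b <;> simp [dnKey] at hp
        rename_i x y
        have hruntrue : ∀ q ∈ run, dnKey q = true := fun q hq => by rw [hrunall q hq, hkk]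
        rw [show dnAux ((some x, some y) :: ps) [] [] [] = dnAux ((run ++ rest)) [x] [y] [] by
          rw [hps]; simp [dnAux]]
        rw [dnAux_trueRun run rest [x] [y] hruntrue]
        rw [show dnStep [] (true, (some x, some y) :: run) =
          [(x :: run.filterMap (fun q => q.1), y :: run.filterMap (fun q => q.2))] by
          simp [dnStep]]
        have hBrest : dnAux rest [] [] [] = (dnGroupby rest).foldl dnStep [] := ih rest hrestlen
        rcases hrc : rest with - | ⟨q, qs⟩
        · simp [dnAux, dnGroupby]
        · have hq : dnKey q = false := by
            have := dnDropWhile_head (fun r => dnKey r == k) ps q qs (hrest.symm.trans hrc)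
            simpa [hkk] using this
          have hrhs : (dnGroupby (q :: qs)).foldl dnStep [] = dnAux qs [] [] [] := by
            rw [← hrc, ← hBrest, hrc]
            obtain ⟨qa, qb⟩ := q
            cases qa <;> cases qb <;> simp [dnKey] at hq <;> simp [dnAux]
          rw [hrhs]
          have hlhs : dnAux (q :: qs) ([x] ++ run.filterMap (fun q => q.1)) ([y] ++ run.filterMap (fun q => q.2)) []
              = dnAux qs [] [] [(([x] ++ run.filterMap (fun q => q.1), [y] ++ run.filterMap (fun q => q.2)))] := by
            obtain ⟨qa, qb⟩ := q
            cases qa <;> cases qb <;> simp [dnKey] at hq <;> simp [dnAux]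
          rw [hlhs, dnAux_acc]
          simp

theorem delete_nones_eq (la lb : List (Option Int)) (h : la.length = lb.length) :
    delete_nones la lb = delete_nones_alt la lb := by
  unfold delete_nones delete_nones_alt
  rw [dnLoopA_eq_aux la lb [] [] [] h,
      dnMain (la.zip lb).length (la.zip lb) le_rfl]
  rfl

-- ===== VERDICT (by name: the statement is the Claim_ definition above) =====
theorem delete_nones_spec : Claim_equal_delete_nones := by
  intro la lb _ hpre
  exact delete_nones_eq la lb hpre
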